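-- pv_equiv track=rewrite | github.com/pypi-data/pypi-mirror-360 | packages/inpip/inpip-0.1.1-py3-none-any.whl/ipip/file_context.py | clear_context_if_new_operation
-- ===== SOURCE A (Python) =====
-- def clear_context_if_new_operation(query: str) -> bool:
--     """Clear context if this is a new type of operation."""
--     # Commands that start fresh context
--     fresh_commands = [
--         "list", "find", "show", "search",
--         "create file", "create folder", "create directory"
--     ]
--
--     query_lower = query.lower()
--     for cmd in fresh_commands:
--         if cmd in query_lower:
--             return True
--
--     return False
-- ===== SOURCE B (Python) =====
-- def clear_context_if_new_operation(query: str) -> bool: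
--     """Clear context if this is a new type of operation."""
--     cmds = ("list", "find", "show", "search",
--             "create file", "create folder", "create directory")
--     q = query.lower()
--     # single left-to-right pass over positions: at each position, test whether
--     # any command starts there (instead of one substring search per command)
--     for i in range(len(q) + 1):
--         if any(q.startswith(c, i) for c in cmds):
--             return True
--     return False
-- ===== Notes on version B (the rewrite author's own statement) =====
-- stated objective: alternative
-- what changed: A scans the whole lowercased query once per command with a substring test; B makes a single left-to-right pass over the positions of the lowercased query and tests at each position whether any command starts there.
import Mathlib
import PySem

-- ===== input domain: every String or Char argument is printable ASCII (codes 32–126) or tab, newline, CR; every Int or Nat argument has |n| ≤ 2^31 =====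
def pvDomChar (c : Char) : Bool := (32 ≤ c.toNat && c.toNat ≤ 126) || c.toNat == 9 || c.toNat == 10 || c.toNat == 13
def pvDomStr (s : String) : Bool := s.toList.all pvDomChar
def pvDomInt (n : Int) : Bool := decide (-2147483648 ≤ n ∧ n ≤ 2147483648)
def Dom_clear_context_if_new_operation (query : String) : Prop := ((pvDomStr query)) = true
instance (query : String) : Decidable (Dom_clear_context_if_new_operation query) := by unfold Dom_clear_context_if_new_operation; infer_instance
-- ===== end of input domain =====

-- B replaces A's per-command substring scan by one pass over the query's positions testing prefixes (objective: alternative).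

-- the fixed command list, shared literal of both Pythons
def pvFreshCmds : List (List Char) :=
  ["list".toList, "find".toList, "show".toList, "search".toList,
   "create file".toList, "create folder".toList, "create directory".toList]

-- ===== PORT A =====
-- A's loop: for cmd in fresh_commands: if cmd in query_lower: return True
def pvALoop (q : List Char) : List (List Char) → Bool
  | [] => false
  | c :: rest => if PySem.Chars.isIn c q then true else pvALoop q rest

def clear_context_if_new_operation (query : String) : Bool :=
  pvALoop (PySem.Chars.lower query.toList) pvFreshCmds

-- ===== PORT B =====
-- B's loop: for each position (suffix) of q, test whether some command starts there
def pvBScan (cmds : List (List Char)) : List Char → Bool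
  | [] => if cmds.any (fun c => PySem.Chars.startswith [] c) then true else false
  | x :: t =>
    if cmds.any (fun c => PySem.Chars.startswith (x :: t) c) then true
    else pvBScan cmds t

def clear_context_if_new_operation_alt (query : String) : Bool :=
  pvBScan pvFreshCmds (PySem.Chars.lower query.toList)

-- ===== PRECONDITION & SPEC =====
def Spec_clear_context_if_new_operation (query : String) (out : Bool) : Prop := out = clear_context_if_new_operation_alt query
instance (query : String) (out : Bool) : Decidable (Spec_clear_context_if_new_operation query out) := by unfold Spec_clear_context_if_new_operation; infer_instance

-- ===== CLAIM (what is proved, stated in full; the proofs are below) =====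
def Claim_equal_clear_context_if_new_operation : Prop := ∀ (query : String), Dom_clear_context_if_new_operation query → Spec_clear_context_if_new_operation query (clear_context_if_new_operation query)

-- ===== LEMMAS AND PROOFS =====

theorem pvALoop_eq_any (q : List Char) (cmds : List (List Char)) :
    pvALoop q cmds = cmds.any (fun c => PySem.Chars.isIn c q) := by
  induction cmds with
  | nil => rfl
  | cons c rest ih => cases h : PySem.Chars.isIn c q <;> simp [pvALoop, h, ih]

theorem pvBScan_eq_any (cmds : List (List Char)) (l : List Char) :
    pvBScan cmds l = cmds.any (fun c => PySem.Chars.isIn c l) := by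
  induction l with
  | nil =>
    show (if cmds.any (fun c => PySem.Chars.startswith [] c) then true else false) = _
    rw [Bool.eq_iff_iff]
    simp [List.any_eq_true, PySem.Chars.startswith_iff, PySem.Chars.isIn_iff_infix]
  | cons x t ih =>
    show (if cmds.any (fun c => PySem.Chars.startswith (x :: t) c) then true else pvBScan cmds t) = _
    by_cases h : (cmds.any fun c => PySem.Chars.startswith (x :: t) c) = true
    · rw [if_pos h]
      obtain ⟨c, hc, hp⟩ := List.any_eq_true.mp h
      rw [PySem.Chars.startswith_iff] at hp
      symm
      rw [List.any_eq_true]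
      exact ⟨c, hc, (PySem.Chars.isIn_iff_infix _ _).mpr hp.isInfix⟩
    · rw [if_neg h, ih, Bool.eq_iff_iff]
      simp only [List.any_eq_true, PySem.Chars.isIn_iff_infix]
      constructor
      · rintro ⟨c, hc, hi⟩
        exact ⟨c, hc, List.infix_cons hi⟩
      · rintro ⟨c, hc, hi⟩
        rcases List.infix_cons_iff.mp hi with hp | hs
        · exact absurd (List.any_eq_true.mpr ⟨c, hc, (PySem.Chars.startswith_iff _ _).mpr hp⟩) h
        · exact ⟨c, hc, hs⟩

-- ===== VERDICT (by name: the statement is the Claim_ definition above) =====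
theorem clear_context_if_new_operation_spec : Claim_equal_clear_context_if_new_operation := by
  intro query _
  unfold Spec_clear_context_if_new_operation clear_context_if_new_operation clear_context_if_new_operation_alt
  rw [pvALoop_eq_any, pvBScan_eq_any]
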